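-- pv_equiv track=rewrite | github.com/pypi-data/pypi-mirror-114 | packages/portfoliotools/portfoliotools-2.0.7.tar.gz/portfoliotools-2.0.7/portfoliotools/screener/strategy_screener.py | getCurrentAction
-- ===== SOURCE A (Python) =====
-- def getCurrentAction(series):
--     score = -1 # Hold:0, NA:-1
--     if series[-1] == 'Buy':
--         score = 1
--     elif series[-1] == 'Sell':
--         score = 2
--     else:
--         for x in series:
--             if x == 'Buy':
--                 score = 0
--             if x == 'Sell' and score == 0:
--                 score = -1
--     if score == 1:
--         return 'Buy'
--     elif score == 2:
--         return 'Sell'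
--     elif score == 0:
--         return 'Hold'
--     else: return -1
-- ===== SOURCE B (Python) =====
-- def getCurrentAction(series):
--     last = series[-1]
--     if last == 'Buy':
--         return 'Buy'
--     if last == 'Sell':
--         return 'Sell'
--     for x in reversed(series):
--         if x == 'Buy':
--             return 'Hold'
--         if x == 'Sell':
--             return -1
--     return -1
-- ===== Notes on version B (the rewrite author's own statement) =====
-- stated objective: simpler
-- what changed: The stateful forward loop maintaining a score is replaced by a short-circuiting reverse scan that returns on the first 'Buy' or 'Sell' seen, and the score-to-label translation table disappears in favour of direct returns.
-- outside the precondition, e.g. on getCurrentAction([]): A raises IndexError, B raises IndexError; on getCurrentAction(['Hold']): A returns -1, B returns -1; on getCurrentAction(['Buy', 'Sell', 'x']): A returns -1, B returns -1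
import Mathlib
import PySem

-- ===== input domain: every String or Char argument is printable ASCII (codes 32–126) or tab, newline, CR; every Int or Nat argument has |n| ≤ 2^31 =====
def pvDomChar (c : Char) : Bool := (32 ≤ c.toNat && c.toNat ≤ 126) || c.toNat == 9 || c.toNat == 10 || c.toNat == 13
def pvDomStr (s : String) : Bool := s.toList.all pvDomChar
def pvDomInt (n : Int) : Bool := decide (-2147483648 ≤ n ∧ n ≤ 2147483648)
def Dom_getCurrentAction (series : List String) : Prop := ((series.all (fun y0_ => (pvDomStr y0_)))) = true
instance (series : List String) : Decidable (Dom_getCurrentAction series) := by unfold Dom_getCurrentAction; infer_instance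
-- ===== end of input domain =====

-- B replaces A's stateful forward loop (score accumulator + score-to-label table) by a
-- short-circuiting reverse scan that answers at the first 'Buy'/'Sell' seen (objective: simpler).

-- ===== PORT A =====
def getCurrentAction (series : List String) : String :=
  match PySem.List.pyGet? series (-1) with
  | none => ""          -- series[-1] raises IndexError; outside Pre_
  | some last =>
    let score : Int :=
      if last = "Buy" then 1
      else if last = "Sell" then 2
      else
        series.foldl (fun score x =>
          let score := if x = "Buy" then (0 : Int) else score
          if x = "Sell" ∧ score = 0 then -1 else score) (-1)
    if score = 1 then "Buy"
    else if score = 2 then "Sell"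
    else if score = 0 then "Hold"
    else ""              -- Python returns the int -1 here; outside Pre_

-- ===== PORT B =====
-- the 'for x in reversed(series)' loop of Source B (early returns become the recursion's results)
def pvRevScan : List String → String
  | [] => ""             -- Source B returns the int -1 here; outside Pre_
  | x :: rest =>
    if x = "Buy" then "Hold"
    else if x = "Sell" then ""   -- Source B returns the int -1 here; outside Pre_
    else pvRevScan rest

def getCurrentAction_alt (series : List String) : String :=
  match PySem.List.pyGet? series (-1) with
  | none => ""          -- series[-1] raises IndexError; outside Pre_
  | some last =>
    if last = "Buy" then "Buy"
    else if last = "Sell" then "Sell"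
    else pvRevScan series.reverse

-- ===== PRECONDITION & SPEC =====
-- Pre_ excludes the empty list (A raises IndexError) and the inputs on which A returns the
-- int -1 instead of a string (no 'Buy'/'Sell' signal, or the last such signal is 'Sell'):
-- there A's value is not of the declared String type; B raises / returns -1 identically there.
def Pre_getCurrentAction (series : List String) : Prop :=
  series ≠ [] ∧
    (series.getLast? = some "Buy" ∨ series.getLast? = some "Sell" ∨
      (series.filter (fun s => s == "Buy" || s == "Sell")).getLast? = some "Buy")
instance (series : List String) : Decidable (Pre_getCurrentAction series) := by
  unfold Pre_getCurrentAction; infer_instance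
def pvWitness_getCurrentAction : List String := ["Buy", "Hold"]
def Spec_getCurrentAction (series : List String) (out : String) : Prop := out = getCurrentAction_alt series
instance (series : List String) (out : String) : Decidable (Spec_getCurrentAction series out) := by unfold Spec_getCurrentAction; infer_instance

-- ===== CLAIM (what is proved, stated in full; the proofs are below) =====
def Claim_equal_getCurrentAction : Prop := ∀ (series : List String), Dom_getCurrentAction series → Pre_getCurrentAction series → Spec_getCurrentAction series (getCurrentAction series)

-- ===== LEMMAS AND PROOFS =====

-- A's forward loop computes 0 exactly when the last 'Buy'/'Sell' entry is 'Buy', else -1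
theorem pvScore_eq (l : List String) :
    l.foldl (fun score x =>
        let score := if x = "Buy" then (0 : Int) else score
        if x = "Sell" ∧ score = 0 then -1 else score) (-1) =
      (if (l.filter (fun s => s == "Buy" || s == "Sell")).getLast? = some "Buy" then 0 else -1) := by
  induction l using List.reverseRecOn with
  | nil => simp
  | append_singleton l x ih =>
    rw [List.foldl_append, List.foldl_cons, List.foldl_nil, ih, List.filter_append]
    by_cases hb : x = "Buy"
    · simp [hb]
    · by_cases hs : x = "Sell"
      · simp only [hs]
        simp only [List.getLast?_append]
        split_ifs <;> simp_all
      · simp [hb, hs]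

-- B's reverse scan answers from the head of the reversed filtered list
theorem pvRevScan_eq (m : List String) :
    pvRevScan m = (if (m.filter (fun s => s == "Buy" || s == "Sell")).head? = some "Buy" then "Hold" else "") := by
  induction m with
  | nil => simp [pvRevScan]
  | cons x rest ih =>
    by_cases hb : x = "Buy"
    · simp [pvRevScan, hb]
    · by_cases hs : x = "Sell"
      · simp [pvRevScan, hs]
      · simp [pvRevScan, hb, hs, ih]

theorem pvRevScan_reverse (l : List String) :
    pvRevScan l.reverse =
      (if (l.filter (fun s => s == "Buy" || s == "Sell")).getLast? = some "Buy" then "Hold" else "") := by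
  rw [pvRevScan_eq, List.filter_reverse, List.head?_reverse]

-- ===== VERDICT (by name: the statement is the Claim_ definition above) =====
theorem getCurrentAction_spec : Claim_equal_getCurrentAction := by
  intro series _ hPre
  obtain ⟨hne, hcase⟩ := hPre
  unfold Spec_getCurrentAction getCurrentAction getCurrentAction_alt
  rw [PySem.List.pyGet?_neg_one]
  obtain ⟨last, hlast⟩ := List.getLast?_isSome.mpr hne |> Option.isSome_iff_exists.mp
  rw [hlast]
  by_cases hb : last = "Buy"
  · simp [hb]
  · by_cases hs : last = "Sell"
    · simp [hs]
    · have hfil : (series.filter (fun s => s == "Buy" || s == "Sell")).getLast? = some "Buy" := by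
        rcases hcase with h | h | h
        · exact absurd (by rw [hlast] at h; injection h) hb
        · exact absurd (by rw [hlast] at h; injection h) hs
        · exact h
      simp only [pvScore_eq, pvRevScan_reverse, hfil]
      simp [hb, hs]
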